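-- pv_equiv track=rewrite | github.com/Huang-Jichen/Spring-AI-Alibaba-FlightAgent-myChange | spring-ai-alibaba-agent-example/playground-flight-booking/evaluation/run_eval.py | retrieval_source_hit
-- ===== SOURCE A (Python) =====
-- from typing import Dict, List, Tuple
--
-- def retrieval_source_hit(retrieved_docs: List[Dict], expected_sources: List[str]) -> bool:
--     if not expected_sources:
--         return True
--     expected = set(expected_sources)
--     for doc in retrieved_docs:
--         if doc.get("source") in expected:
--             return True
--     return False
-- ===== SOURCE B (Python) =====
-- def retrieval_source_hit(retrieved_docs, expected_sources):
--     if not expected_sources: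
--         return True
--     xs = sorted(d["source"] for d in retrieved_docs if "source" in d)
--     ys = sorted(expected_sources)
--     i = j = 0
--     while i < len(xs) and j < len(ys):
--         if xs[i] == ys[j]:
--             return True
--         if xs[i] < ys[j]:
--             i += 1
--         else:
--             j += 1
--     return False
-- ===== Notes on version B (the rewrite author's own statement) =====
-- stated objective: alternative
-- what changed: Replaces A's hash-set membership loop by a sort-then-merge algorithm: both source lists are sorted and scanned in lockstep with two pointers until a common element is found.
import Mathlib
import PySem

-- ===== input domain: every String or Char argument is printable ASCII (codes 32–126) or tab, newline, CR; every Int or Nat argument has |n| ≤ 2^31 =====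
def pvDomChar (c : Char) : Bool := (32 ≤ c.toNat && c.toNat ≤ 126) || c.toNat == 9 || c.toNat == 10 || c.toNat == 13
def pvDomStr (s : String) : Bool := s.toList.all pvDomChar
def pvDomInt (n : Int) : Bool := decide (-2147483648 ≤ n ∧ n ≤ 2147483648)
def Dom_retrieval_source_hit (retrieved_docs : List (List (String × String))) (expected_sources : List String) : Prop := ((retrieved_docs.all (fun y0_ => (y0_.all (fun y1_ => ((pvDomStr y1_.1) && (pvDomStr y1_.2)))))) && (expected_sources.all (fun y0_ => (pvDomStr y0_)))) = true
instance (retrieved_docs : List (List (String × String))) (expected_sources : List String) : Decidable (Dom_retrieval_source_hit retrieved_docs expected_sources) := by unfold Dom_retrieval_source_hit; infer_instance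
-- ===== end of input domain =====

-- B replaces A's hash-set membership loop by sort-then-merge: both source lists are sorted and scanned in lockstep with two pointers (alternative algorithm; not faster).


-- ===== PORT A =====
-- A's loop with early return, as structural recursion over the docs list.
-- 'doc.get("source") in expected': get? yields Option String; Python's None is never a member
-- of a set of strings, hence the 'none => false' arm (exact on the typed domain).
def retAHit (expected : PySem.Set String) : List (List (String × String)) → Bool
  | [] => false
  | doc :: rest =>
    (match PySem.Dict.get? ⟨doc⟩ "source" with
      | some s => PySem.Set.contains expected s
      | none => false) || retAHit expected rest

def retrieval_source_hit (retrieved_docs : List (List (String × String))) (expected_sources : List String) : Bool :=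
  if expected_sources = [] then true
  else retAHit (PySem.Set.ofList expected_sources) retrieved_docs

-- ===== PORT B =====
-- B: the two-pointer while loop over the two sorted lists; advancing a pointer past an
-- already-inspected element = dropping the head, so the loop is recursion on the two lists.
def retMerge : List String → List String → Bool
  | [], _ => false
  | _ :: _, [] => false
  | x :: xs, y :: ys =>
    if x = y then true
    else if x < y then retMerge xs (y :: ys)
    else retMerge (x :: xs) ys

def retrieval_source_hit_alt (retrieved_docs : List (List (String × String))) (expected_sources : List String) : Bool :=
  if expected_sources = [] then true
  else
    retMerge
      (PySem.List.sorted (retrieved_docs.filterMap (fun d => PySem.Dict.get? ⟨d⟩ "source")) (fun x => x) false)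
      (PySem.List.sorted expected_sources (fun x => x) false)

-- ===== PRECONDITION & SPEC =====
def Spec_retrieval_source_hit (retrieved_docs : List (List (String × String))) (expected_sources : List String) (out : Bool) : Prop := out = retrieval_source_hit_alt retrieved_docs expected_sources
instance (retrieved_docs : List (List (String × String))) (expected_sources : List String) (out : Bool) : Decidable (Spec_retrieval_source_hit retrieved_docs expected_sources out) := by unfold Spec_retrieval_source_hit; infer_instance

-- ===== CLAIM =====
def Claim_equal_retrieval_source_hit : Prop := ∀ (retrieved_docs : List (List (String × String))) (expected_sources : List String), Dom_retrieval_source_hit retrieved_docs expected_sources → Spec_retrieval_source_hit retrieved_docs expected_sources (retrieval_source_hit retrieved_docs expected_sources)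

-- ===== LEMMAS AND PROOFS =====
theorem retAHit_iff (expected : PySem.Set String) (docs : List (List (String × String))) :
    retAHit expected docs = true ↔
      ∃ s ∈ docs.filterMap (fun d => PySem.Dict.get? ⟨d⟩ "source"), s ∈ expected := by
  induction docs with
  | nil => simp [retAHit]
  | cons d rest ih =>
    simp only [retAHit, Bool.or_eq_true, ih, List.filterMap_cons]
    cases h : PySem.Dict.get? ⟨d⟩ "source" with
    | none => simp
    | some s => simp

-- correctness of the merge scan on sorted inputs: on two â¤-sorted lists it reports
-- exactly whether the lists share an element
theorem retMerge_iff (xs ys : List String) :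
    xs.Pairwise (· ≤ ·) → ys.Pairwise (· ≤ ·) →
    (retMerge xs ys = true ↔ ∃ s ∈ xs, s ∈ ys) := by
  fun_induction retMerge xs ys with
  | case1 ys => intro _ _; simp
  | case2 x xs => intro _ _; simp
  | case3 xs y ys => intro _ _; simp
  | case4 x xs y ys hne hlt ih =>
    intro hx hy
    have hx' := (List.pairwise_cons.mp hx).2
    have hnot : x ∉ y :: ys := by
      intro hmem
      rcases List.mem_cons.mp hmem with h | h
      · exact absurd h hne
      · have := (List.pairwise_cons.mp hy).1 x h
        exact absurd (lt_of_lt_of_le hlt this) (lt_irrefl x)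
    rw [ih hx' hy]
    constructor
    · rintro ⟨s, hs1, hs2⟩; exact ⟨s, List.mem_cons_of_mem _ hs1, hs2⟩
    · rintro ⟨s, hs1, hs2⟩
      rcases List.mem_cons.mp hs1 with h | h
      · exact absurd (h ▸ hs2) hnot
      · exact ⟨s, h, hs2⟩
  | case5 x xs y ys hne hnlt ih =>
    intro hx hy
    have hy' := (List.pairwise_cons.mp hy).2
    have hyx : y < x := lt_of_le_of_ne (le_of_not_gt hnlt) (fun h => hne h.symm)
    have hnot : y ∉ x :: xs := by
      intro hmem
      rcases List.mem_cons.mp hmem with h | h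
      · exact absurd h.symm hne
      · have := (List.pairwise_cons.mp hx).1 y h
        exact absurd (lt_of_lt_of_le hyx this) (lt_irrefl y)
    rw [ih hx hy']
    constructor
    · rintro ⟨s, hs1, hs2⟩; exact ⟨s, hs1, List.mem_cons_of_mem _ hs2⟩
    · rintro ⟨s, hs1, hs2⟩
      rcases List.mem_cons.mp hs2 with h | h
      · exact absurd (h ▸ hs1) hnot
      · exact ⟨s, hs1, h⟩

-- ===== VERDICT =====
theorem retrieval_source_hit_spec : Claim_equal_retrieval_source_hit := by
  intro docs expected _
  unfold Spec_retrieval_source_hit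
  by_cases h : expected = []
  · simp [retrieval_source_hit, retrieval_source_hit_alt, h]
  · simp only [retrieval_source_hit, retrieval_source_hit_alt, if_neg h]
    rw [Bool.eq_iff_iff, retAHit_iff,
      retMerge_iff _ _ (PySem.List.sorted_pairwise _ _) (PySem.List.sorted_pairwise _ _)]
    simp [PySem.List.mem_sorted, PySem.Set.mem_ofList]
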